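-- pv_equiv track=rewrite | github.com/bgg-lee/programming-reference | Probs_including_Gichul/Gichul/QE_23-1/QE_1_string_backtracking_permutation.py | bar
-- ===== SOURCE A (Python) =====
-- def bar(s:str) -> str:
--     ans = []
--     def backtrack(curr:str , remain:str) -> None:
--         if len(curr) >= 2: # adj check
--             temp = curr[-2:]
--             if (temp in s) or (temp[::-1] in s) : return
--         # remain에 중복 letter만 남아있으면 지금 curr을 append
--         cond = True
--         for x in remain:
--             if x not in curr:
--                 cond = False
--                 break
--         if cond :
--             ans.append(curr)
--             return
--         if not remain:
--             ans.append(curr)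
--             return
--         for i in range(len(remain)):
--             if remain[i] in curr : continue #중복제거
--             backtrack(curr+remain[i], remain[:i]+remain[i+1:])
--
--     backtrack("",s)
--     if not ans : return ""
--     else : return ans[0]
-- ===== SOURCE B (Python) =====
-- def bar(s: str) -> str:
--     # Iterative DFS with an explicit stack of (curr, remain) partial states;
--     # returns the first successful leaf (A's DFS pre-order ans[0]) directly.
--     stack = [("", s)]
--     while stack:
--         curr, remain = stack.pop()
--         if len(curr) >= 2:
--             t = curr[-2:]
--             if t in s or t[::-1] in s:
--                 continue
--         if all(x in curr for x in remain):
--             return curr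
--         children = [(curr + remain[i], remain[:i] + remain[i+1:])
--                     for i in range(len(remain)) if remain[i] not in curr]
--         stack.extend(reversed(children))
--     return ""
-- ===== Notes on version B (the rewrite author's own statement) =====
-- stated objective: faster
-- what changed: A's recursive backtracking closure keeps exploring and appends every successful permutation to a shared ans list before returning ans[0]; B runs the same DFS iteratively over an explicit stack of (curr, remain) states (children pushed in reverse so they pop in A's pre-order) and returns the first success immediately, exploring no further.
import Mathlib
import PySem

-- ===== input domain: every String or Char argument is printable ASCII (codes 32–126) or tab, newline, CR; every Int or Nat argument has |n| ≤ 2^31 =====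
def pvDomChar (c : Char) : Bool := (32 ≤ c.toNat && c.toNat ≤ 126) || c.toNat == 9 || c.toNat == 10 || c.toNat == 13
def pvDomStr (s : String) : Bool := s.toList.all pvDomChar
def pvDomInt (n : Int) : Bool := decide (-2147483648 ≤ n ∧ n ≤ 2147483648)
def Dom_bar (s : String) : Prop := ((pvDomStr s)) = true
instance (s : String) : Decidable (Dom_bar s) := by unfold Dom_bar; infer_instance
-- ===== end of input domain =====

-- B replaces A's recursive backtracking (which collects every success and returns ans[0])
-- by an iterative DFS over an explicit stack of (curr, remain) states that returns the
-- first success directly (objective: alternative decomposition).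

-- ===== PORT A =====
-- A's recursive `backtrack`, returning the list of strings appended to `ans` (in append order).
-- The `for i in range(len(remain))` loop is barGo, recursing on the index i.
-- remain[:i] + remain[i+1:] is r.take i ++ r.drop (i+1)  (PySem.List.slice_to_natCast / slice_from_natCast).
mutual
def barBT (s curr remain : List Char) : List (List Char) :=
  -- `if len(curr) >= 2: temp = curr[-2:]; if temp in s or temp[::-1] in s: return`
  -- temp[::-1] is (PySem.List.slice? temp none none (-1)).getD [] (= temp.reverse, slice?_none_none_neg_one)
  if 2 ≤ curr.length ∧
      (PySem.Chars.isIn (PySem.List.slice curr (some (-2)) none) s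
        || PySem.Chars.isIn ((PySem.List.slice? (PySem.List.slice curr (some (-2)) none) none none (-1)).getD []) s) = true then
    []
  -- `cond = True; for x in remain: if x not in curr: cond = False; break` — the loop computes remain.all
  else if remain.all (fun x => curr.contains x) then [curr]
  else if remain = [] then [curr]
  else barGo s curr remain 0
termination_by (remain.length, 1, 0)
decreasing_by
  apply Prod.Lex.right; apply Prod.Lex.left; omega
def barGo (s curr remain : List Char) (i : Nat) : List (List Char) :=
  if h : i < remain.length then
    (if curr.contains remain[i] then []
     else barBT s (curr ++ [remain[i]]) (remain.take i ++ remain.drop (i+1)))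
    ++ barGo s curr remain (i+1)
  else []
termination_by (remain.length, 0, remain.length - i)
decreasing_by
  · apply Prod.Lex.left; simp [List.length_take, List.length_drop]; omega
  · apply Prod.Lex.right; apply Prod.Lex.right; omega
end

def bar (s : String) : String :=
  let ans := barBT s.toList [] s.toList
  if ans = [] then "" else String.ofList (PySem.List.pyGetD ans 0 [])

-- ===== PORT B =====
-- the children list comprehension of Source B
def altChildren (curr remain : List Char) : List (List Char × List Char) :=
  (List.range remain.length).filterMap (fun i =>
    if h : i < remain.length then
      if curr.contains remain[i] then none
      else some (curr ++ [remain[i]], remain.take i ++ remain.drop (i+1))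
    else none)

-- termination measure bound for the stack loop (cited by barStep's decreasing_by)
theorem altChildren_meas_lt (c r : List Char) :
    ((altChildren c r).map (fun p => (p.2.length + 1).factorial)).sum < (r.length + 1).factorial := by
  have hmem : ∀ x ∈ (altChildren c r).map (fun p => (p.2.length + 1).factorial),
      x ≤ r.length.factorial := by
    intro x hx
    obtain ⟨p, hp, rfl⟩ := List.mem_map.mp hx
    obtain ⟨i, hi, hf⟩ := List.mem_filterMap.mp hp
    by_cases h : i < r.length
    · simp [h] at hf
      rcases hf with ⟨hcont, rfl⟩
      have hl : (List.take i r ++ List.drop (i+1) r).length + 1 = r.length := by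
        simp [List.length_take, List.length_drop]; omega
      simp only [hl]; rfl
    · simp [h] at hf
  have h1 := List.sum_le_card_nsmul _ _ hmem
  simp only [smul_eq_mul, List.length_map] at h1
  have h2 : (altChildren c r).length ≤ r.length := by
    calc (altChildren c r).length ≤ (List.range r.length).length := List.length_filterMap_le _ _
    _ = r.length := List.length_range
  have h3 : 0 < r.length.factorial := Nat.factorial_pos _
  calc ((altChildren c r).map (fun p => (p.2.length + 1).factorial)).sum
      ≤ (altChildren c r).length * r.length.factorial := h1
    _ ≤ r.length * r.length.factorial := Nat.mul_le_mul_right _ h2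
    _ < (r.length + 1) * r.length.factorial := by nlinarith
    _ = (r.length + 1).factorial := (Nat.factorial_succ _).symm

-- the `while stack:` loop of Source B; the Lean list's head is the stack's top, so Source B's
-- push-reversed-then-pop-last order is exactly `altChildren curr remain ++ rest`.
def barStep (s : List Char) (stack : List (List Char × List Char)) : Option (List Char) :=
  match stack with
  | [] => none
  | (curr, remain) :: rest =>
    if 2 ≤ curr.length ∧
        (PySem.Chars.isIn (PySem.List.slice curr (some (-2)) none) s
          || PySem.Chars.isIn ((PySem.List.slice? (PySem.List.slice curr (some (-2)) none) none none (-1)).getD []) s) = true then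
      barStep s rest
    else if remain.all (fun x => curr.contains x) then some curr
    else barStep s (altChildren curr remain ++ rest)
termination_by (stack.map (fun p => (p.2.length + 1).factorial)).sum
decreasing_by
  · simp only [List.map_cons, List.sum_cons]
    have := Nat.factorial_pos (remain.length + 1); omega
  · simp only [List.map_cons, List.sum_cons, List.map_append, List.sum_append]
    have := altChildren_meas_lt curr remain; omega

def bar_alt (s : String) : String :=
  match barStep s.toList [([], s.toList)] with
  | some a => String.ofList a
  | none => ""

-- ===== PRECONDITION & SPEC =====
def Spec_bar (s : String) (out : String) : Prop := out = bar_alt s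
instance (s : String) (out : String) : Decidable (Spec_bar s out) := by unfold Spec_bar; infer_instance

-- ===== CLAIM (what is proved, stated in full; the proofs are below) =====
def Claim_equal_bar : Prop := ∀ (s : String), Dom_bar s → Spec_bar s (bar s)

-- ===== LEMMAS AND PROOFS =====

-- proof helper: the children comprehension, rebuilt index by index (matches barGo's recursion)
def chAux (c r : List Char) (i : Nat) : List (List Char × List Char) :=
  if h : i < r.length then
    if c.contains r[i] then chAux c r (i+1)
    else (c ++ [r[i]], r.take i ++ r.drop (i+1)) :: chAux c r (i+1)
  else []
termination_by r.length - i

theorem filterMap_range'_eq_chAux (c r : List Char) : ∀ (m i : Nat), r.length - i = m →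
    (List.range' i m).filterMap (fun i =>
      if h : i < r.length then
        if c.contains r[i] then none
        else some (c ++ [r[i]], r.take i ++ r.drop (i+1))
      else none) = chAux c r i := by
  intro m
  induction m with
  | zero =>
    intro i hi
    have h : ¬ i < r.length := by omega
    rw [chAux]; simp [h]
  | succ m ihm =>
    intro i hi
    have hlt : i < r.length := by omega
    rw [List.range'_succ, List.filterMap_cons, chAux]
    by_cases hcon : c.contains (r[i]'hlt)
    · simp only [dif_pos hlt, if_pos hcon]
      exact ihm (i+1) (by omega)
    · simp only [dif_pos hlt, if_neg hcon]
      rw [ihm (i+1) (by omega)]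

theorem altChildren_eq_chAux (c r : List Char) : altChildren c r = chAux c r 0 := by
  rw [altChildren, List.range_eq_range']
  exact filterMap_range'_eq_chAux c r r.length 0 (by omega)

theorem step_eq (s : List Char) : ∀ (n : Nat) (curr remain : List Char), remain.length = n →
    ∀ rest, barStep s ((curr, remain) :: rest) =
      (match (barBT s curr remain).head? with
       | some a => some a
       | none => barStep s rest) := by
  intro n
  induction n using Nat.strong_induction_on with
  | _ n IH =>
  intro curr remain hlen rest
  by_cases hp : 2 ≤ curr.length ∧
      (PySem.Chars.isIn (PySem.List.slice curr (some (-2)) none) s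
        || PySem.Chars.isIn ((PySem.List.slice? (PySem.List.slice curr (some (-2)) none) none none (-1)).getD []) s) = true
  · rw [barStep, barBT, if_pos hp, if_pos hp]; rfl
  · by_cases hc : (remain.all (fun x => curr.contains x)) = true
    · rw [barStep, barBT, if_neg hp, if_neg hp, if_pos hc, if_pos hc]; rfl
    · have hne : remain ≠ [] := by
        intro h; subst h; simp at hc
      rw [barStep, barBT, if_neg hp, if_neg hp, if_neg hc, if_neg hc, if_neg hne,
          altChildren_eq_chAux]
      -- inner induction over the loop index
      have inner : ∀ (m i : Nat), remain.length - i = m → ∀ rest',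
          barStep s (chAux curr remain i ++ rest') =
            (match (barGo s curr remain i).head? with
             | some a => some a
             | none => barStep s rest') := by
        intro m
        induction m with
        | zero =>
          intro i hi rest'
          have h : ¬ i < remain.length := by omega
          rw [chAux, barGo]; simp [h]
        | succ m ihm =>
          intro i hi rest'
          have hlt : i < remain.length := by omega
          rw [chAux, barGo]
          by_cases hcon : curr.contains (remain[i]'hlt)
          · simp only [dif_pos hlt, if_pos hcon, List.nil_append]
            exact ihm (i+1) (by omega) rest'
          · simp only [dif_pos hlt, if_neg hcon, List.cons_append]
            rw [IH ((remain.take i ++ remain.drop (i+1)).length)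
                  (by simp [List.length_take, List.length_drop]; omega)
                  (curr ++ [(remain[i]'hlt)]) _ rfl]
            rw [List.head?_append]
            cases hbt : (barBT s (curr ++ [(remain[i]'hlt)]) (remain.take i ++ remain.drop (i+1))).head? with
            | some a => simp
            | none =>
              simp only [Option.none_or]
              exact ihm (i+1) (by omega) rest'
      exact inner remain.length 0 (by omega) rest

-- ===== VERDICT (by name: the statement is the Claim_ definition above) =====
theorem bar_spec : Claim_equal_bar := by
  intro s _
  unfold Spec_bar bar bar_alt
  rw [step_eq s.toList s.toList.length [] s.toList rfl []]
  cases h : barBT s.toList [] s.toList with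
  | nil => simp [barStep]
  | cons a t => simp [PySem.List.pyGetD_zero_cons]
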